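-- pv_equiv track=rewrite | github.com/AdamOtto/Daily-Challenges | Challenge352.py | downHelper
-- ===== SOURCE A (Python) =====
-- def downHelper(i,j, board, N):
--     if board[i][j] == 1:
--         count = 1
--         for k in range(i + 1, N):
--             if board[k][j] == 0:
--                 break
--             count += 1
--         for k in reversed(range(0, i)):
--             if board[k][j] == 0:
--                 break
--             count += 1
--         return count
--     return 0
-- ===== SOURCE B (Python) =====
-- def downHelper(i, j, board, N):
--     # Single top-to-bottom sweep of column j: record the nearest zero boundaries
--     # around row i, then the run length is bottom - top - 1.
--     if board[i][j] != 1: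
--         return 0
--     top = -1
--     bottom = N
--     for k in range(N):
--         if board[k][j] == 0:
--             if k < i:
--                 top = k
--             elif k > i and k < bottom:
--                 bottom = k
--     return bottom - top - 1
-- ===== Notes on version B (the rewrite author's own statement) =====
-- stated objective: alternative
-- what changed: Replaces A's center-out expansion (two directional scans with early break) by one forward sweep of the whole column that records the nearest zero boundary above and below row i and returns bottom - top - 1.
-- outside the precondition, e.g. on downHelper(-1, 0, [[1]], 1): A returns 2, B returns 1
import Mathlib
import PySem

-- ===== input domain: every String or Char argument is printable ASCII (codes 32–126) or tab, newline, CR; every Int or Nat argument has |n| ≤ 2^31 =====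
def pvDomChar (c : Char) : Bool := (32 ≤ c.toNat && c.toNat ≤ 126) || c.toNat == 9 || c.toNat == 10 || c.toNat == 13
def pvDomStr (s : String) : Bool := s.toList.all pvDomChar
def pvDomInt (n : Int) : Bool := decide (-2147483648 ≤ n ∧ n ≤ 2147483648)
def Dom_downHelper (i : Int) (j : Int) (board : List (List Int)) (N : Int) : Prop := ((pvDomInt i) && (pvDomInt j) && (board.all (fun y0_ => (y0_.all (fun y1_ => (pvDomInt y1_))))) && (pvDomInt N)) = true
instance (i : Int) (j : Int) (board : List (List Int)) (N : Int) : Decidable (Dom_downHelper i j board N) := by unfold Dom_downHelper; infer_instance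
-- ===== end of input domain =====

-- B is an alternative single-sweep computation of the same run length (not faster; same O(N)).
-- The equivalence is about the return value; neither program mutates its arguments.

-- ===== PORT A =====
-- board[k][j]; exact under Pre_ (indices in range, so Python never raises or wraps there)
def pvCell (j : Int) (board : List (List Int)) (k : Int) : Int :=
  PySem.List.pyGetD (PySem.List.pyGetD board k []) j 0

-- the 'for k in …: if board[k][j]==0: break; count += 1' loop: counts the nonzero prefix
def pvScan (j : Int) (board : List (List Int)) : List Int → Int
  | [] => 0
  | k :: ks => if pvCell j board k = 0 then 0 else 1 + pvScan j board ks

def downHelper (i : Int) (j : Int) (board : List (List Int)) (N : Int) : Int :=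
  if pvCell j board i = 1 then
    1 + pvScan j board (PySem.List.pyRange (i + 1) N 1)
      + pvScan j board ((PySem.List.pyRange 0 i 1).reverse)
  else 0

-- ===== PORT B =====
-- the body of B's single for-loop over range(N)
def pvStep (i j : Int) (board : List (List Int)) (tb : Int × Int) (k : Int) : Int × Int :=
  if pvCell j board k = 0 then
    if k < i then (k, tb.2)
    else if i < k ∧ k < tb.2 then (tb.1, k)
    else tb
  else tb

def downHelper_alt (i : Int) (j : Int) (board : List (List Int)) (N : Int) : Int :=
  if pvCell j board i ≠ 1 then 0
  else
    let tb := (PySem.List.pyRange 0 N 1).foldl (pvStep i j board) (-1, N)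
    tb.2 - tb.1 - 1

-- ===== PRECONDITION & SPEC =====
-- Pre_ admits every input on which the guard cell board[i][j] is readable and ≠ 1 (both
-- programs return 0 at once), plus the function's natural domain (N = number of rows,
-- in-range i and j) when the guard fires; it excludes inputs where A raises IndexError,
-- or where A's nonzero count relies on Python's negative-index wraparound or on N
-- disagreeing with the board's size — accidents of A's indexing, not specified behaviour.
def Pre_downHelper (i : Int) (j : Int) (board : List (List Int)) (N : Int) : Prop :=
  (PySem.Raise.InRange board.length i ∧
    PySem.Raise.InRange (PySem.List.pyGetD board i []).length j ∧
    PySem.List.pyGetD (PySem.List.pyGetD board i []) j 0 ≠ 1) ∨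
  (0 ≤ i ∧ i < N ∧ 0 ≤ j ∧ (board.length : Int) = N ∧ ∀ row ∈ board, j < (row.length : Int))
instance (i : Int) (j : Int) (board : List (List Int)) (N : Int) : Decidable (Pre_downHelper i j board N) := by unfold Pre_downHelper; infer_instance

def pvWitness_downHelper : Int × Int × List (List Int) × Int := (1, 0, [[1], [1], [0]], 3)

def Spec_downHelper (i : Int) (j : Int) (board : List (List Int)) (N : Int) (out : Int) : Prop := out = downHelper_alt i j board N
instance (i : Int) (j : Int) (board : List (List Int)) (N : Int) (out : Int) : Decidable (Spec_downHelper i j board N out) := by unfold Spec_downHelper; infer_instance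

-- ===== CLAIM (what is proved, stated in full; the proofs are below) =====
def Claim_equal_downHelper : Prop := ∀ (i : Int) (j : Int) (board : List (List Int)) (N : Int), Dom_downHelper i j board N → Pre_downHelper i j board N → Spec_downHelper i j board N (downHelper i j board N)

-- ===== LEMMAS AND PROOFS =====

-- step facts, read off pvStep's branches
theorem pvStep_skip (i j : Int) (board : List (List Int)) (tb : Int × Int) (k : Int)
    (hz : pvCell j board k ≠ 0) : pvStep i j board tb k = tb := by
  unfold pvStep; rw [if_neg hz]

theorem pvStep_top (i j : Int) (board : List (List Int)) (tb : Int × Int) (k : Int)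
    (hz : pvCell j board k = 0) (hk : k < i) : pvStep i j board tb k = (k, tb.2) := by
  unfold pvStep; rw [if_pos hz, if_pos hk]

-- a fold step leaves the state (t, b) alone on rows k with i < k and b ≤ k
theorem pvStep_stay (i j : Int) (board : List (List Int)) (t b : Int) :
    ∀ L : List Int, (∀ k ∈ L, i < k ∧ b ≤ k) →
      L.foldl (pvStep i j board) (t, b) = (t, b) := by
  intro L
  induction L with
  | nil => intro _; rfl
  | cons k ks ih =>
    intro h
    have hk := h k (by simp)
    have hstep : pvStep i j board (t, b) k = (t, b) := by
      unfold pvStep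
      split_ifs with h0 h1 h2
      · omega
      · omega
      · rfl
      · rfl
    rw [List.foldl_cons, hstep]
    exact ih (fun k hk => h k (by simp [hk]))

-- the sweep over the rows above i (range(0, m) with m ≤ i): the bottom component is
-- untouched, and A's upward scan of the reversed range equals m - 1 - top
theorem pv_up (i j : Int) (board : List (List Int)) :
    ∀ (m : Nat), (m : Int) ≤ i → ∀ (b0 : Int),
      ((PySem.List.pyRange 0 (m : Int) 1).foldl (pvStep i j board) (-1, b0)).2 = b0 ∧
      pvScan j board ((PySem.List.pyRange 0 (m : Int) 1).reverse)
        = (m : Int) - 1 - ((PySem.List.pyRange 0 (m : Int) 1).foldl (pvStep i j board) (-1, b0)).1 := by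
  intro m
  induction m with
  | zero =>
    intro _ b0
    simp [PySem.List.pyRange_one_eq_nil, pvScan]
  | succ m ih =>
    intro hm b0
    have hmi : (m : Int) < i := by push_cast at hm; omega
    have hcast : ((m + 1 : Nat) : Int) = (m : Int) + 1 := by push_cast; ring
    have hsplit : PySem.List.pyRange 0 ((m : Int) + 1) 1
        = PySem.List.pyRange 0 (m : Int) 1 ++ [(m : Int)] :=
      PySem.List.pyRange_one_succ_right (by positivity)
    rw [hcast, hsplit, List.foldl_append, List.reverse_append]
    simp only [List.foldl_cons, List.foldl_nil, List.reverse_cons, List.reverse_nil,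
      List.nil_append, List.singleton_append]
    obtain ⟨h2, h1⟩ := ih (le_of_lt hmi) b0
    by_cases hz : pvCell j board (m : Int) = 0
    · rw [pvStep_top i j board _ _ hz hmi, h2]
      refine ⟨rfl, ?_⟩
      simp only [pvScan, if_pos hz]
      omega
    · rw [pvStep_skip i j board _ _ hz]
      refine ⟨h2, ?_⟩
      simp only [pvScan, if_neg hz]
      omega

-- the sweep over the rows below i (range(a, b) with i < a, started at bottom = b):
-- top is untouched and bottom ends at a + (A's downward scan)
theorem pv_down (i j : Int) (board : List (List Int)) :
    ∀ (n : Nat) (a b : Int), i < a → b - a = (n : Int) → ∀ (t0 : Int),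
      (PySem.List.pyRange a b 1).foldl (pvStep i j board) (t0, b)
        = (t0, a + pvScan j board (PySem.List.pyRange a b 1)) := by
  intro n
  induction n with
  | zero =>
    intro a b hia hn t0
    have hba : b = a := by omega
    subst hba
    simp [PySem.List.pyRange_one_eq_nil le_rfl, pvScan]
  | succ n ih =>
    intro a b hia hn t0
    have hab : a < b := by omega
    rw [PySem.List.pyRange_one_cons hab, List.foldl_cons]
    by_cases hz : pvCell j board a = 0
    · have hstep : pvStep i j board (t0, b) a = (t0, a) := by
        unfold pvStep
        rw [if_pos hz, if_neg (by omega), if_pos ⟨hia, hab⟩]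
      rw [hstep, pvStep_stay i j board t0 a _ ?bnd]
      · simp [pvScan, hz]
      case bnd =>
        intro k hk
        rw [PySem.List.mem_pyRange_one] at hk
        omega
    · rw [pvStep_skip i j board _ _ hz, ih (a + 1) b (by omega) (by omega) t0, Prod.mk.injEq]
      simp only [pvScan, if_neg hz]
      exact ⟨trivial, by ring⟩

-- ===== VERDICT (by name: the statement is the Claim_ definition above) =====
theorem downHelper_spec : Claim_equal_downHelper := by
  intro i j board N _ hpre
  rcases hpre with ⟨_, _, hne⟩ | ⟨hi0, hiN, hj0, hlen, hrows⟩
  · -- the guard cell is not 1: both programs return 0 immediately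
    unfold Spec_downHelper downHelper downHelper_alt pvCell
    rw [if_neg hne, if_pos hne]
  unfold Spec_downHelper downHelper downHelper_alt
  by_cases hc : pvCell j board i = 1
  · rw [if_pos hc, if_neg (by simpa using hc)]
    have hiT : ((i.toNat : Nat) : Int) = i := by omega
    -- split range(N) at i and i+1
    have hsplit1 : PySem.List.pyRange 0 N 1
        = PySem.List.pyRange 0 i 1 ++ PySem.List.pyRange i N 1 :=
      PySem.List.pyRange_one_append 0 i N hi0 (by omega)
    have hsplit2 : PySem.List.pyRange i N 1 = i :: PySem.List.pyRange (i + 1) N 1 :=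
      PySem.List.pyRange_one_cons hiN
    obtain ⟨h2, h1⟩ := pv_up i j board i.toNat (by omega) N
    rw [hiT] at h2 h1
    set r := (PySem.List.pyRange 0 i 1).foldl (pvStep i j board) (-1, N) with hr
    have hrpair : r = (r.1, N) := by rw [← h2]
    have hstepi : pvStep i j board r i = r :=
      pvStep_skip i j board r i (by rw [hc]; decide)
    have hdown := pv_down i j board (N - (i + 1)).toNat (i + 1) N (by omega) (by omega) r.1
    simp only [hsplit1, hsplit2, List.foldl_append, List.foldl_cons, ← hr, hstepi]
    rw [hrpair, hdown]
    simp only []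
    omega
  · rw [if_neg hc, if_pos (by simpa using hc)]
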